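-- pv_equiv track=rewrite | github.com/IKorn2/bumpix_bot | parser.py | _get_free_times_normal
-- ===== SOURCE A (Python) =====
-- def _is_collide(start: int, end: int, blocks: list[list[int]]) -> list[int] | None:
--     """Перевіряє перетин інтервалу [start, end) з масивом блоків."""
--     for block in blocks:
--         if not (start >= block[1] or block[0] >= end):
--             return block
--     return None
--
-- def _get_free_times_normal(
--     start_work: int,
--     end_work: int,
--     events: list[list[int]],
--     breaks: list[list[int]],
--     interval: int,
--     need_minutes: int,
--     allow_last: bool,
-- ) -> list[int]:
--     """Обчислити вільні слоти у звичайному режимі (як у JS-коді Bumpix)."""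
--     free = []
--     current = start_work
--     while current < end_work:
--         collide = _is_collide(current, current + need_minutes, events)
--         if not collide:
--             collide = _is_collide(current, current + need_minutes, breaks)
--
--         if not collide and current + need_minutes > end_work:
--             if not allow_last:
--                 collide = [0, end_work]
--
--         if not collide:
--             free.append(current)
--             current += interval
--         else:
--             # Стрибаємо за блок і вирівнюємо за інтервалом, щоб залишатися на сітці
--             current = collide[1]
--             passed = current - start_work
--             if passed > 0 and interval > 0:
--                 remainder = passed % interval
--                 if remainder > 0:
--                     current += (interval - remainder)
--             elif passed < 0:
--                 current = start_work
--     return free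
-- ===== SOURCE B (Python) =====
-- def _get_free_times_normal(
--     start_work: int,
--     end_work: int,
--     events: list[list[int]],
--     breaks: list[list[int]],
--     interval: int,
--     need_minutes: int,
--     allow_last: bool,
-- ) -> list[int]:
--     # Sort all blocks once by start; sweep the grid with a monotone pointer and
--     # a running maximum of the ends of blocks whose start lies before the slot end.
--     blocks = sorted(events + breaks, key=lambda b: b[0])
--     n = len(blocks)
--     free = []
--     j = 0
--     maxend = None
--     for p in range(start_work, end_work, interval):
--         limit = p + need_minutes
--         while j < n and blocks[j][0] < limit:
--             e = blocks[j][1]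
--             if maxend is None or e > maxend:
--                 maxend = e
--             j += 1
--         if (maxend is None or maxend <= p) and (limit <= end_work or allow_last):
--             free.append(p)
--     return free
-- ===== Notes on version B (the rewrite author's own statement) =====
-- stated objective: alternative
-- what changed: Instead of rescanning every event and break block for each candidate slot (and re-checking after each jump), B sorts all blocks once by start and sweeps the slot grid left to right with a monotone pointer and a running maximum of block ends, deciding each slot in amortised O(1) in the number of blocks; A's jump always lands on the next grid point and skipped grid points are provably blocked, so the outputs coincide.
-- outside the precondition, e.g. on _get_free_times_normal(5, 3, [], [], -1, 1, True): A returns [], B returns [5, 4]; on _get_free_times_normal(3, 3, [[]], [], 1, 1, False): A returns [], B raises IndexError; on _get_free_times_normal(0, 5, [[0, 10]], [], -1, 1, True): A returns [], B returns []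
import Mathlib
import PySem

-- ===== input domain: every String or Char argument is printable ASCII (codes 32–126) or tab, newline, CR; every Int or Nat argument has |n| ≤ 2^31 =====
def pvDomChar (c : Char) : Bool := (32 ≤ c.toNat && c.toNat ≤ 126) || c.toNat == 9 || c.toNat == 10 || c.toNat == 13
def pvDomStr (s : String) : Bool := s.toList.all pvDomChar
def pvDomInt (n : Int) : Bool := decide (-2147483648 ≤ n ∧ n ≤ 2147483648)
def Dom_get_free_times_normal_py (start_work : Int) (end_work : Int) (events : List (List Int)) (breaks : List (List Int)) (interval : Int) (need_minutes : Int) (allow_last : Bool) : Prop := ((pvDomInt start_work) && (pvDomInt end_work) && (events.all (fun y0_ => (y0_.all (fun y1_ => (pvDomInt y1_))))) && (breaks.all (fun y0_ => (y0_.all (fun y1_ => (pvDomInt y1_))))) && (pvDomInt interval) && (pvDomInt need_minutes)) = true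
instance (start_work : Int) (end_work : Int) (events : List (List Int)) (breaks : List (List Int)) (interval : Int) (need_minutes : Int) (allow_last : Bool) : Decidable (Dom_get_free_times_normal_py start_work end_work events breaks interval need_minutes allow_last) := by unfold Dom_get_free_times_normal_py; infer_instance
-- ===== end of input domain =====

-- B replaces A's per-slot rescans of all blocks by one sort of the blocks plus a
-- monotone sweep pointer with a running maximum end (objective: alternative).


-- ===== PORT A =====
-- block[0] / block[1] of a block list (defaults never reached under Pre_)
def pvKey (b : List Int) : Int := PySem.List.pyGetD b 0 0
def pvEnd (b : List Int) : Int := PySem.List.pyGetD b 1 0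

-- _is_collide
def pvIsCollide (s e : Int) : List (List Int) → Option (List Int)
  | [] => none
  | b :: rest =>
    if ¬(s ≥ pvEnd b ∨ pvKey b ≥ e) then some b else pvIsCollide s e rest

-- the while-loop of _get_free_times_normal; fuel bounds the iteration count
-- (each iteration strictly increases `cur` when 1 ≤ interval, so the fuel chosen
-- at the call site is never exhausted under Pre_)
def pvLoopA (sw ew iv nm : Int) (ev br : List (List Int)) (al : Bool) :
    Nat → Int → List Int → List Int
  | 0, _, free => free
  | fuel + 1, cur, free =>
    if cur < ew then
      let c0 := match pvIsCollide cur (cur + nm) ev with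
                | some b => some b
                | none => pvIsCollide cur (cur + nm) br
      let c1 := if c0 = none ∧ cur + nm > ew then
                  (if al = false then some [0, ew] else c0)
                else c0
      match c1 with
      | none => pvLoopA sw ew iv nm ev br al fuel (cur + iv) (free ++ [cur])
      | some b =>
        let cur' := pvEnd b
        let passed := cur' - sw
        let cur2 :=
          if passed > 0 ∧ iv > 0 then
            (if PySem.Int.mod passed iv > 0 then cur' + (iv - PySem.Int.mod passed iv) else cur')
          else if passed < 0 then sw else cur'
        pvLoopA sw ew iv nm ev br al fuel cur2 free
    else free

def get_free_times_normal_py (start_work : Int) (end_work : Int) (events : List (List Int)) (breaks : List (List Int)) (interval : Int) (need_minutes : Int) (allow_last : Bool) : List Int :=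
  pvLoopA start_work end_work interval need_minutes events breaks allow_last
    ((end_work - start_work).toNat + 1) start_work []

-- ===== PORT B =====
-- the inner `while j < n and blocks[j][0] < limit` loop: consume a prefix of the
-- remaining sorted blocks, keeping the running maximum of their ends
-- `if maxend is None or e > maxend: maxend = e`
def pvUpd (m : Option Int) (e : Int) : Option Int :=
  match m with
  | none => some e
  | some v => if e > v then some e else some v

def pvConsume (limit : Int) : List (List Int) → Option Int → List (List Int) × Option Int
  | [], m => ([], m)
  | b :: bs, m =>
    if pvKey b < limit then pvConsume limit bs (pvUpd m (pvEnd b))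
    else (b :: bs, m)

-- the `for p in range(start_work, end_work, interval)` loop
def pvLoopB (ew nm : Int) (al : Bool) :
    List Int → List (List Int) → Option Int → List Int → List Int
  | [], _, _, free => free
  | p :: ps, rest, m, free =>
    let s := pvConsume (p + nm) rest m
    let ok := (match s.2 with
               | none => true
               | some v => decide (v ≤ p)) && (decide (p + nm ≤ ew) || al)
    pvLoopB ew nm al ps s.1 s.2 (if ok then free ++ [p] else free)

def get_free_times_normal_py_alt (start_work : Int) (end_work : Int) (events : List (List Int)) (breaks : List (List Int)) (interval : Int) (need_minutes : Int) (allow_last : Bool) : List Int :=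
  pvLoopB end_work need_minutes allow_last
    (PySem.List.pyRange start_work end_work interval)
    (PySem.List.sorted (events ++ breaks) pvKey) none []

-- ===== PRECONDITION & SPEC =====
-- Pre_ excludes blocks too short for the fields A reads (Python A raises IndexError,
-- B raises in its sort) and, when the slot grid is non-degenerate, interval < 1
-- (A's while loop diverges there, or returns [] on end_work ≤ start_work inputs
-- where B's descending grid is not empty); degenerate cases where both sides
-- produce the empty grid are kept.  Interval < 1 inputs on which A happens to
-- terminate with [] (every slot blocked) also fall outside Pre_: whether A
-- terminates there is not a closed-form condition on the input.
def Pre_get_free_times_normal_py (start_work : Int) (end_work : Int) (events : List (List Int)) (breaks : List (List Int)) (interval : Int) (need_minutes : Int) (allow_last : Bool) : Prop :=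
  (1 ≤ interval ∧ ∀ b ∈ events ++ breaks, 2 ≤ b.length)
  ∨ (end_work ≤ start_work ∧ 1 ≤ interval ∧ ∀ b ∈ events ++ breaks, 1 ≤ b.length)
  ∨ (end_work = start_work ∧ interval ≠ 0 ∧ ∀ b ∈ events ++ breaks, 1 ≤ b.length)
instance (start_work : Int) (end_work : Int) (events : List (List Int)) (breaks : List (List Int)) (interval : Int) (need_minutes : Int) (allow_last : Bool) : Decidable (Pre_get_free_times_normal_py start_work end_work events breaks interval need_minutes allow_last) := by unfold Pre_get_free_times_normal_py; infer_instance

def pvWitness_get_free_times_normal_py : Int × Int × List (List Int) × List (List Int) × Int × Int × Bool :=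
  (0, 60, [[10, 20]], [[30, 40]], 15, 30, false)

def Spec_get_free_times_normal_py (start_work : Int) (end_work : Int) (events : List (List Int)) (breaks : List (List Int)) (interval : Int) (need_minutes : Int) (allow_last : Bool) (out : List Int) : Prop := out = get_free_times_normal_py_alt start_work end_work events breaks interval need_minutes allow_last
instance (start_work : Int) (end_work : Int) (events : List (List Int)) (breaks : List (List Int)) (interval : Int) (need_minutes : Int) (allow_last : Bool) (out : List Int) : Decidable (Spec_get_free_times_normal_py start_work end_work events breaks interval need_minutes allow_last out) := by unfold Spec_get_free_times_normal_py; infer_instance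

-- ===== CLAIM (what is proved, stated in full; the proofs are below) =====
def Claim_equal_get_free_times_normal_py : Prop := ∀ (start_work : Int) (end_work : Int) (events : List (List Int)) (breaks : List (List Int)) (interval : Int) (need_minutes : Int) (allow_last : Bool), Dom_get_free_times_normal_py start_work end_work events breaks interval need_minutes allow_last → Pre_get_free_times_normal_py start_work end_work events breaks interval need_minutes allow_last → Spec_get_free_times_normal_py start_work end_work events breaks interval need_minutes allow_last (get_free_times_normal_py start_work end_work events breaks interval need_minutes allow_last)

-- ===== LEMMAS AND PROOFS =====

-- the common specification predicate: slot p is free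
def pvFree (ew nm : Int) (al : Bool) (bs : List (List Int)) (p : Int) : Bool :=
  bs.all (fun b => !(decide (pvKey b < p + nm) && decide (p < pvEnd b)))
    && (decide (p + nm ≤ ew) || al)

-- pyRange with positive step: nil / cons / sortedness
lemma pvRange_pos_nil {s : Int} (hs : 0 < s) {a b : Int} (h : b ≤ a) :
    PySem.List.pyRange a b s = [] := by
  rw [PySem.List.pyRange_of_pos a b hs]
  simp [if_neg (not_lt.2 h)]

lemma pvRange_pos_cons {s : Int} (hs : 0 < s) {a b : Int} (h : a < b) :
    PySem.List.pyRange a b s = a :: PySem.List.pyRange (a + s) b s := by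
  rw [PySem.List.pyRange_of_pos a b hs, PySem.List.pyRange_of_pos (a+s) b hs]
  rw [if_pos h]
  have key : ((b - a + s - 1) / s).toNat
      = (if a + s < b then ((b - (a+s) + s - 1) / s).toNat else 0) + 1 := by
    have h1 : b - a + s - 1 = (b - (a+s) + s - 1) + 1 * s := by ring
    have h2 : (b - a + s - 1) / s = (b - (a+s) + s - 1) / s + 1 := by
      rw [h1, Int.add_mul_ediv_right _ _ (by omega)]
    by_cases hc : a + s < b
    · rw [if_pos hc, h2]
      have : 0 ≤ (b - (a+s) + s - 1) / s := Int.ediv_nonneg (by omega) (by omega)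
      omega
    · rw [if_neg hc, h2]
      have : (b - (a+s) + s - 1) / s = 0 := by
        apply Int.ediv_eq_zero_of_lt <;> omega
      omega
  rw [key, List.range_succ_eq_map]
  simp [List.map_map, Function.comp_def, mul_add]
  intro k _; ring

lemma pvRange_pos_pairwise {s : Int} (hs : 0 < s) (a b : Int) :
    (PySem.List.pyRange a b s).Pairwise (· ≤ ·) := by
  rw [PySem.List.pyRange_of_pos a b hs]
  rw [List.pairwise_map]
  apply List.pairwise_lt_range.imp
  intro i j hij
  have : (i : Int) ≤ (j : Int) := by exact_mod_cast Nat.le_of_lt hij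
  nlinarith

-- characterisation of _is_collide
lemma pvIsCollide_none_iff (s e : Int) (bs : List (List Int)) :
    pvIsCollide s e bs = none ↔ ∀ b ∈ bs, ¬(pvKey b < e ∧ s < pvEnd b) := by
  induction bs with
  | nil => simp [pvIsCollide]
  | cons b rest ih =>
    simp only [pvIsCollide, List.mem_cons]
    split_ifs with h
    · rw [ih]
      constructor
      · rintro hall b' (rfl | hb')
        · omega
        · exact hall b' hb'
      · exact fun hall b' hb' => hall b' (Or.inr hb')
    · exact iff_of_false (by simp) (fun hall => hall b (Or.inl rfl) ⟨by omega, by omega⟩)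

lemma pvIsCollide_some (s e : Int) (bs : List (List Int)) (b : List Int)
    (h : pvIsCollide s e bs = some b) : b ∈ bs ∧ pvKey b < e ∧ s < pvEnd b := by
  induction bs with
  | nil => simp [pvIsCollide] at h
  | cons b' rest ih =>
    simp only [pvIsCollide] at h
    split_ifs at h with hc
    · obtain ⟨h1, h2, h3⟩ := ih h
      exact ⟨List.mem_cons_of_mem _ h1, h2, h3⟩
    · cases h
      exact ⟨List.mem_cons_self, by omega, by omega⟩

-- skipping a fully-blocked aligned region does not change the filtered grid
lemma pvFilter_skip {iv : Int} (hiv : 0 < iv) (f : Int → Bool) :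
    ∀ (n : Nat) (a m b : Int), (m - a).toNat ≤ n → a ≤ m → iv ∣ (m - a) →
      (∀ p, a ≤ p → p < m → iv ∣ (p - a) → f p = false) →
      (PySem.List.pyRange a b iv).filter f = (PySem.List.pyRange m b iv).filter f := by
  intro n
  induction n with
  | zero =>
    intro a m b hn ham _ _
    have : m = a := by omega
    rw [this]
  | succ n ih =>
    intro a m b hn ham hdvd hblock
    rcases eq_or_lt_of_le ham with rfl | hlt
    · rfl
    · have hstep : iv ≤ m - a := Int.le_of_dvd (by omega) hdvd
      by_cases hab : a < b
      · rw [pvRange_pos_cons hiv hab]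
        have hfa : f a = false := hblock a le_rfl hlt ⟨0, by ring⟩
        rw [List.filter_cons_of_neg (by simp [hfa])]
        apply ih
        · omega
        · omega
        · obtain ⟨k, hk⟩ := hdvd
          exact ⟨k - 1, by rw [mul_sub]; omega⟩
        · intro p hp1 hp2 hp3
          apply hblock p (by omega) hp2
          obtain ⟨k, hk⟩ := hp3
          exact ⟨k + 1, by rw [mul_add]; omega⟩
      · rw [pvRange_pos_nil hiv (by omega), pvRange_pos_nil hiv (by omega)]

-- jumping past a blocked region and re-aligning keeps the filtered grid
lemma pvBlockedJump (sw ew iv nm : Int) (ev br : List (List Int)) (al : Bool) (hiv : 1 ≤ iv)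
    (fuel : Nat)
    (ih : ∀ (cur : Int) (acc : List Int), sw ≤ cur → iv ∣ (cur - sw) → (ew - cur).toNat < fuel →
        pvLoopA sw ew iv nm ev br al fuel cur acc
          = acc ++ (PySem.List.pyRange cur ew iv).filter (pvFree ew nm al (ev ++ br)))
    (cur : Int) (acc : List Int) (hsw : sw ≤ cur) (hdvd : iv ∣ (cur - sw))
    (hfuel : (ew - cur).toNat < fuel + 1) (hcur : cur < ew) (x : Int) (hx : cur < x)
    (hblock : ∀ p, cur ≤ p → p < x → pvFree ew nm al (ev ++ br) p = false) :
    pvLoopA sw ew iv nm ev br al fuel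
      (if x - sw > 0 ∧ iv > 0 then
        (if PySem.Int.mod (x - sw) iv > 0 then x + (iv - PySem.Int.mod (x - sw) iv) else x)
       else if x - sw < 0 then sw else x) acc
      = acc ++ (PySem.List.pyRange cur ew iv).filter (pvFree ew nm al (ev ++ br)) := by
  have hiv0 : (0 : Int) < iv := by omega
  have hpassed : 0 < x - sw := by omega
  rw [if_pos ⟨hpassed, hiv0⟩]
  have hr0 : 0 ≤ PySem.Int.mod (x - sw) iv := PySem.Int.mod_nonneg _ hiv0
  have hr1 : PySem.Int.mod (x - sw) iv < iv := PySem.Int.mod_lt _ hiv0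
  have hq : PySem.Int.floordiv (x - sw) iv * iv + PySem.Int.mod (x - sw) iv = x - sw :=
    PySem.Int.floordiv_mul_add_mod _ _
  set r := PySem.Int.mod (x - sw) iv with hrdef
  set q := PySem.Int.floordiv (x - sw) iv with hqdef
  obtain ⟨cur2, hc2⟩ : ∃ c : Int, c = (if r > 0 then x + (iv - r) else x) := ⟨_, rfl⟩
  rw [← hc2]
  have hxle : x ≤ cur2 := by rw [hc2]; split_ifs <;> omega
  have hcur2 : cur < cur2 := lt_of_lt_of_le hx hxle
  have hdvd2 : iv ∣ (cur2 - sw) := by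
    rw [hc2]
    split_ifs with h
    · exact ⟨q + 1, by linear_combination -hq⟩
    · exact ⟨q, by
        have hr : r = 0 := by omega
        linear_combination -hq + hr⟩
  have hmin : ∀ p, iv ∣ (p - sw) → x ≤ p → cur2 ≤ p := by
    intro p hpd hxp
    obtain ⟨k, hk⟩ := hpd
    rw [hc2]
    split_ifs with h
    · have h1 : q * iv < k * iv := by rw [mul_comm k iv, ← hk]; omega
      have h2 : q < k := lt_of_mul_lt_mul_right h1 (by omega)
      have h3 : (q + 1) * iv ≤ k * iv :=
        mul_le_mul_of_nonneg_right (by omega) (by omega)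
      rw [add_mul] at h3
      rw [mul_comm k iv] at h3
      omega
    · exact hxp
  have hfuel2 : (ew - cur2).toNat < fuel := by omega
  rw [ih cur2 acc (by omega) hdvd2 hfuel2]
  congr 1
  symm
  apply pvFilter_skip hiv0 _ ((cur2 - cur).toNat) cur cur2 ew le_rfl (by omega)
  · obtain ⟨k1, hk1⟩ := hdvd
    obtain ⟨k2, hk2⟩ := hdvd2
    exact ⟨k2 - k1, by rw [mul_sub]; omega⟩
  · intro p hp1 hp2 hp3
    apply hblock p hp1
    by_contra hge
    push_neg at hge
    have : iv ∣ (p - sw) := by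
      obtain ⟨k1, hk1⟩ := hdvd
      obtain ⟨k2, hk2⟩ := hp3
      exact ⟨k2 + k1, by rw [mul_add]; omega⟩
    exact absurd (hmin p this hge) (by omega)

-- A's loop computes the filtered grid
lemma pvLoopA_eq (sw ew iv nm : Int) (ev br : List (List Int)) (al : Bool)
    (hiv : 1 ≤ iv) :
    ∀ (fuel : Nat) (cur : Int) (acc : List Int), sw ≤ cur → iv ∣ (cur - sw) →
      (ew - cur).toNat < fuel →
      pvLoopA sw ew iv nm ev br al fuel cur acc
        = acc ++ (PySem.List.pyRange cur ew iv).filter (pvFree ew nm al (ev ++ br)) := by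
  intro fuel
  induction fuel with
  | zero => intro cur acc _ _ h; exact absurd h (Nat.not_lt_zero _)
  | succ fuel ih =>
    intro cur acc hsw hdvd hfuel
    by_cases hcur : cur < ew
    case neg =>
      simp only [pvLoopA, if_neg hcur]
      rw [pvRange_pos_nil (by omega) (by omega)]
      simp
    case pos =>
    have hiv0 : (0 : Int) < iv := by omega
    cases hev : pvIsCollide cur (cur + nm) ev with
    | some b =>
      obtain ⟨hmem, hk, he⟩ := pvIsCollide_some _ _ _ _ hev
      have : pvLoopA sw ew iv nm ev br al (fuel + 1) cur acc
          = pvLoopA sw ew iv nm ev br al fuel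
              (if pvEnd b - sw > 0 ∧ iv > 0 then
                (if PySem.Int.mod (pvEnd b - sw) iv > 0 then
                  pvEnd b + (iv - PySem.Int.mod (pvEnd b - sw) iv) else pvEnd b)
               else if pvEnd b - sw < 0 then sw else pvEnd b) acc := by
        simp only [pvLoopA, if_pos hcur, hev]
        rw [if_neg (by simp)]
      rw [this]
      apply pvBlockedJump sw ew iv nm ev br al hiv fuel ih cur acc hsw hdvd hfuel hcur _ he
      intro p hp1 hp2
      unfold pvFree
      rw [List.all_eq_false.2 ⟨b, List.mem_append_left _ hmem, by simp; omega⟩]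
      simp
    | none =>
    cases hbr : pvIsCollide cur (cur + nm) br with
    | some b =>
      obtain ⟨hmem, hk, he⟩ := pvIsCollide_some _ _ _ _ hbr
      have : pvLoopA sw ew iv nm ev br al (fuel + 1) cur acc
          = pvLoopA sw ew iv nm ev br al fuel
              (if pvEnd b - sw > 0 ∧ iv > 0 then
                (if PySem.Int.mod (pvEnd b - sw) iv > 0 then
                  pvEnd b + (iv - PySem.Int.mod (pvEnd b - sw) iv) else pvEnd b)
               else if pvEnd b - sw < 0 then sw else pvEnd b) acc := by
        simp only [pvLoopA, if_pos hcur, hev, hbr]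
        rw [if_neg (by simp)]
      rw [this]
      apply pvBlockedJump sw ew iv nm ev br al hiv fuel ih cur acc hsw hdvd hfuel hcur _ he
      intro p hp1 hp2
      unfold pvFree
      rw [List.all_eq_false.2 ⟨b, List.mem_append_right _ hmem, by simp; omega⟩]
      simp
    | none =>
      have hall : ∀ b ∈ ev ++ br, ¬(pvKey b < cur + nm ∧ cur < pvEnd b) := by
        intro b hb
        rcases List.mem_append.1 hb with h | h
        · exact (pvIsCollide_none_iff _ _ _).1 hev b h
        · exact (pvIsCollide_none_iff _ _ _).1 hbr b h
      by_cases hlast : cur + nm > ew ∧ al = false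
      case pos =>
        have hendv : pvEnd [0, ew] = ew := by simp [pvEnd, PySem.List.pyGetD]
        have : pvLoopA sw ew iv nm ev br al (fuel + 1) cur acc
            = pvLoopA sw ew iv nm ev br al fuel
                (if pvEnd [0, ew] - sw > 0 ∧ iv > 0 then
                  (if PySem.Int.mod (pvEnd [0, ew] - sw) iv > 0 then
                    pvEnd [0, ew] + (iv - PySem.Int.mod (pvEnd [0, ew] - sw) iv) else pvEnd [0, ew])
                 else if pvEnd [0, ew] - sw < 0 then sw else pvEnd [0, ew]) acc := by
          simp only [pvLoopA, if_pos hcur, hev, hbr, hlast.2]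
          rw [if_pos (⟨trivial, hlast.1⟩ : True ∧ cur + nm > ew)]
          rw [if_pos (by trivial)]
        rw [this]
        apply pvBlockedJump sw ew iv nm ev br al hiv fuel ih cur acc hsw hdvd hfuel hcur _
          (by rw [hendv]; omega)
        intro p hp1 hp2
        unfold pvFree
        rw [hlast.2]
        have : decide (p + nm ≤ ew) = false := by simp; omega
        rw [this]
        simp
      case neg =>
        have hfree : pvFree ew nm al (ev ++ br) cur = true := by
          unfold pvFree
          rw [List.all_eq_true.2 (by intro b hb; have := hall b hb; simp; omega)]
          cases al with
          | true => simp
          | false =>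
            have h3 : ¬(cur + nm > ew) := fun hc => hlast ⟨hc, rfl⟩
            have h4 : decide (cur + nm ≤ ew) = true := by simp; omega
            rw [h4]; rfl
        have hstep : pvLoopA sw ew iv nm ev br al (fuel + 1) cur acc
            = pvLoopA sw ew iv nm ev br al fuel (cur + iv) (acc ++ [cur]) := by
          by_cases h2 : cur + nm > ew
          · have hal : al = true := by
              cases al
              · exact absurd ⟨h2, rfl⟩ hlast
              · rfl
            simp only [pvLoopA, if_pos hcur, hev, hbr, hal]
            rw [if_pos (⟨trivial, h2⟩ : True ∧ cur + nm > ew)]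
            rw [if_neg (by simp)]
          · simp only [pvLoopA, if_pos hcur, hev, hbr]
            rw [if_neg (fun hc => h2 hc.2)]
        rw [hstep, ih (cur + iv) (acc ++ [cur]) (by omega)
          (by obtain ⟨k, hk⟩ := hdvd; exact ⟨k + 1, by rw [mul_add]; omega⟩) (by omega)]
        rw [pvRange_pos_cons hiv0 hcur, List.filter_cons_of_pos hfree]
        simp

-- m is the maximum of the ends of the consumed blocks C
def pvMaxProp (m : Option Int) (C : List (List Int)) : Prop :=
  match m with
  | none => C = []
  | some v => v ∈ C.map pvEnd ∧ ∀ e ∈ C.map pvEnd, e ≤ v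

lemma pvMaxProp_step (m : Option Int) (C : List (List Int)) (b : List Int)
    (hm : pvMaxProp m C) :
    pvMaxProp (pvUpd m (pvEnd b)) (C ++ [b]) := by
  unfold pvUpd
  cases m with
  | none =>
    have hC : C = [] := hm
    subst hC
    simp [pvMaxProp]
  | some v =>
    obtain ⟨hv1, hv2⟩ := hm
    by_cases h : pvEnd b > v
    · simp only [if_pos h, pvMaxProp, List.map_append, List.map_cons, List.map_nil]
      refine ⟨List.mem_append_right _ (by simp), ?_⟩
      intro e he
      rcases List.mem_append.1 he with he | he
      · exact le_of_lt (lt_of_le_of_lt (hv2 e he) h)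
      · simp at he; omega
    · simp only [if_neg h, pvMaxProp, List.map_append, List.map_cons, List.map_nil]
      refine ⟨List.mem_append_left _ hv1, ?_⟩
      intro e he
      rcases List.mem_append.1 he with he | he
      · exact hv2 e he
      · simp at he; omega

lemma pvConsume_spec (limit : Int) :
    ∀ (rest : List (List Int)) (m : Option Int) (C : List (List Int)),
      rest.Pairwise (fun a b => pvKey a ≤ pvKey b) → pvMaxProp m C →
      ∃ T, rest = T ++ (pvConsume limit rest m).1 ∧ (∀ b ∈ T, pvKey b < limit) ∧
        (∀ b ∈ (pvConsume limit rest m).1, limit ≤ pvKey b) ∧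
        pvMaxProp (pvConsume limit rest m).2 (C ++ T) := by
  intro rest
  induction rest with
  | nil =>
    intro m C _ hm
    exact ⟨[], by simp [pvConsume], by simp, by simp [pvConsume], by simpa using hm⟩
  | cons b bs ih =>
    intro m C hpw hm
    by_cases hb : pvKey b < limit
    · simp only [pvConsume, if_pos hb]
      obtain ⟨T, hT1, hT2, hT3, hT4⟩ :=
        ih _ (C ++ [b]) (List.Pairwise.of_cons hpw) (pvMaxProp_step m C b hm)
      refine ⟨b :: T, by simpa using hT1, ?_, hT3, by simpa [List.append_assoc] using hT4⟩
      intro b' hb''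
      rcases List.mem_cons.1 hb'' with h | h
      · exact h ▸ hb
      · exact hT2 b' h
    · simp only [pvConsume, if_neg hb]
      refine ⟨[], rfl, by simp, ?_, by simpa using hm⟩
      intro b' hb'
      rcases List.mem_cons.1 hb' with rfl | h2
      · omega
      · have := (List.pairwise_cons.1 hpw).1 b' h2; omega

-- B's loop computes the filtered grid
lemma pvLoopB_eq (ew nm : Int) (al : Bool) :
    ∀ (ps : List Int) (C rest : List (List Int)) (m : Option Int) (acc : List Int),
      (C ++ rest).Pairwise (fun a b => pvKey a ≤ pvKey b) →
      (∀ b ∈ C, ∀ p ∈ ps, pvKey b < p + nm) →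
      pvMaxProp m C →
      ps.Pairwise (· ≤ ·) →
      pvLoopB ew nm al ps rest m acc
        = acc ++ ps.filter (pvFree ew nm al (C ++ rest)) := by
  intro ps
  induction ps with
  | nil => intro C rest m acc _ _ _ _; simp [pvLoopB]
  | cons p ps ih =>
    intro C rest m acc hpw hadm hm hps
    simp only [pvLoopB]
    obtain ⟨T, hT1, hT2, hT3, hT4⟩ :=
      pvConsume_spec (p + nm) rest m C (List.pairwise_append.1 hpw).2.1 hm
    have hsplit : C ++ rest = (C ++ T) ++ (pvConsume (p + nm) rest m).1 := by
      rw [List.append_assoc, ← hT1]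
    have hhead : ∀ p' ∈ ps, p ≤ p' := fun p' hp' => (List.pairwise_cons.1 hps).1 p' hp'
    have hcol : (match (pvConsume (p + nm) rest m).2 with
                 | none => true
                 | some v => decide (v ≤ p))
        = (C ++ rest).all (fun b => !(decide (pvKey b < p + nm) && decide (p < pvEnd b))) := by
      cases h2 : (pvConsume (p + nm) rest m).2 with
      | none =>
        have hCT : C ++ T = [] := by
          have := hT4; rw [h2] at this; exact this
        symm
        rw [List.all_eq_true]
        intro b hb
        have hb' : b ∈ (pvConsume (p + nm) rest m).1 := by
          have := hsplit ▸ hb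
          rcases List.mem_append.1 this with h | h
          · rw [hCT] at h; simp at h
          · exact h
        have := hT3 b hb'
        simp; omega
      | some v =>
        have hT4' : v ∈ (C ++ T).map pvEnd ∧ ∀ e ∈ (C ++ T).map pvEnd, e ≤ v := by
          have := hT4; rw [h2] at this; exact this
        by_cases hv : v ≤ p
        · simp only [hv, decide_true]
          symm
          rw [List.all_eq_true]
          intro b hb
          rcases List.mem_append.1 (hsplit ▸ hb) with h | h
          · have : pvEnd b ≤ v := hT4'.2 _ (List.mem_map_of_mem h)
            simp; omega
          · have := hT3 b h
            simp; omega
        · simp only [hv, decide_false]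
          symm
          rw [List.all_eq_false]
          obtain ⟨b0, hb0, hb0e⟩ := List.mem_map.1 hT4'.1
          refine ⟨b0, hsplit ▸ List.mem_append_left _ hb0, ?_⟩
          have hkey : pvKey b0 < p + nm := by
            rcases List.mem_append.1 hb0 with h | h
            · exact hadm b0 h p (List.mem_cons_self)
            · exact hT2 b0 h
          simp; omega
    have hrec := ih (C ++ T) (pvConsume (p + nm) rest m).1 (pvConsume (p + nm) rest m).2
      (if ((match (pvConsume (p + nm) rest m).2 with
            | none => true
            | some v => decide (v ≤ p)) && (decide (p + nm ≤ ew) || al))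
       then acc ++ [p] else acc)
      (hsplit ▸ hpw)
      (by
        intro b hb p' hp'
        rcases List.mem_append.1 hb with h | h
        · exact hadm b h p' (List.mem_cons_of_mem _ hp')
        · exact lt_of_lt_of_le (hT2 b h) (by have := hhead p' hp'; omega))
      hT4
      (List.Pairwise.of_cons hps)
    rw [hrec, ← hsplit]
    rw [List.filter_cons]
    unfold pvFree
    rw [← hcol]
    cases hok : (match (pvConsume (p + nm) rest m).2 with
                 | none => true
                 | some v => decide (v ≤ p)) && (decide (p + nm ≤ ew) || al)
    · simp
    · simp

-- ===== VERDICT (by name: the statement is the Claim_ definition above) =====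
lemma pvRange_self (a s : Int) : PySem.List.pyRange a a s = [] := by
  simp [PySem.List.pyRange]

-- both ports return [] when the grid is empty (end_work ≤ start_work)
lemma pvEmptyGrid (sw ew iv nm : Int) (ev br : List (List Int)) (al : Bool)
    (hle : ew ≤ sw) (hrange : PySem.List.pyRange sw ew iv = []) :
    get_free_times_normal_py sw ew ev br iv nm al
      = get_free_times_normal_py_alt sw ew ev br iv nm al := by
  unfold get_free_times_normal_py get_free_times_normal_py_alt
  have h1 : (ew - sw).toNat = 0 := by omega
  rw [h1, hrange]
  simp only [pvLoopA, pvLoopB, if_neg (by omega : ¬ sw < ew)]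

theorem get_free_times_normal_py_spec : Claim_equal_get_free_times_normal_py := by
  intro sw ew ev br iv nm al _ hpre
  rcases hpre with ⟨hiv, _⟩ | ⟨hle, hiv, _⟩ | ⟨heq, hiv, _⟩
  case inr.inl =>
    exact pvEmptyGrid sw ew iv nm ev br al hle (pvRange_pos_nil (by omega) hle)
  case inr.inr =>
    exact pvEmptyGrid sw ew iv nm ev br al (le_of_eq heq) (heq ▸ pvRange_self sw iv)
  unfold Spec_get_free_times_normal_py
  unfold get_free_times_normal_py get_free_times_normal_py_alt
  rw [pvLoopA_eq sw ew iv nm ev br al hiv _ sw [] le_rfl ⟨0, by ring⟩ (by omega)]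
  rw [pvLoopB_eq ew nm al (PySem.List.pyRange sw ew iv) []
        (PySem.List.sorted (ev ++ br) pvKey) none []
        (by simpa using PySem.List.sorted_pairwise (ev ++ br) pvKey)
        (by intro b hb; simp at hb)
        rfl
        (pvRange_pos_pairwise (by omega) sw ew)]
  simp only [List.nil_append]
  apply List.filter_congr
  intro p _
  unfold pvFree
  rw [(PySem.List.sorted_perm (ev ++ br) pvKey false).all_eq]
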